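-- pv_equiv track=rewrite | github.com/wderbyshire/advent-of-code-24 | Day 2/puzzle 2b.py | determine_safety
-- ===== SOURCE A (Python) =====
-- def determine_safety(report_list):
--     differences = [report_list[i] - report_list[i + 1] for i in range(len(report_list) - 1)]
--     directions = []
--     pos_dir_count = 0
--     neg_dir_count = 0
--
--     for i in differences:
--         if i != 0:
--             direction = i // abs(i)
--         else:
--             direction = 0
--         directions.append(direction)
--         if direction == 1:
--             pos_dir_count += 1
--         elif direction == -1:
--             neg_dir_count += 1
--
--     if pos_dir_count > neg_dir_count:
--         bad_dir = -1
--     elif pos_dir_count < neg_dir_count: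
--         bad_dir = 1
--     else:
--         return False
--
--     for i in range(len(differences)):
--         if abs(differences[i]) < 1 or abs(differences[i]) > 3:
--             return False
--
--         if directions[i] == bad_dir:
--             return False
--
--     return True
-- ===== SOURCE B (Python) =====
-- def determine_safety(report_list):
--     diffs = [a - b for a, b in zip(report_list, report_list[1:])]
--     if not diffs:
--         return False
--     return all(1 <= d <= 3 for d in diffs) or all(-3 <= d <= -1 for d in diffs)
-- ===== Notes on version B (the rewrite author's own statement) =====
-- stated objective: simpler
-- what changed: Replaced A's direction-tally/majority-vote plus bad-direction-and-magnitude second pass with two direct all-passes over the consecutive differences (all in [1,3] or all in [-3,-1]), with an explicit False for short reports.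
import Mathlib
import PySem

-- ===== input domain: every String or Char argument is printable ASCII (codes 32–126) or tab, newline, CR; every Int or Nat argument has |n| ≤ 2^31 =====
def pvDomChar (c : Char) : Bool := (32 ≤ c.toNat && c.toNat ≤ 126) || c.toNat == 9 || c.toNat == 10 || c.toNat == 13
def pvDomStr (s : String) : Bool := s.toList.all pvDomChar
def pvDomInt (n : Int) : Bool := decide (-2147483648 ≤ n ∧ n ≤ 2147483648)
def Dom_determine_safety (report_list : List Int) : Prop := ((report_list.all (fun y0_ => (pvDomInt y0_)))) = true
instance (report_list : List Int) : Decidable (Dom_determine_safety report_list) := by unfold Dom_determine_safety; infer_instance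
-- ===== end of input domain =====

-- B replaces A's direction-tally/majority-vote + second-pass check with two direct
-- all-passes over the consecutive differences: simpler, same O(n) cost.


-- ===== PORT A =====
-- second loop of A: for i in range(len(differences)): … with early returns
def pvALoop : List Int → List Int → Int → Bool
  | d :: ds, dir :: dirs, bad =>
      if |d| < 1 ∨ |d| > 3 then false
      else if dir = bad then false
      else pvALoop ds dirs bad
  | _, _, _ => true

def determine_safety (report_list : List Int) : Bool :=
  let differences := (List.range (report_list.length - 1)).map
      (fun i => report_list.getD i 0 - report_list.getD (i + 1) 0)
  let st := differences.foldl
      (fun (acc : List Int × Int × Int) i =>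
        let direction : Int := if i ≠ 0 then PySem.Int.floordiv i |i| else 0
        (acc.1 ++ [direction],
         (if direction = 1 then acc.2.1 + 1 else acc.2.1),
         (if direction = -1 then acc.2.2 + 1 else acc.2.2)))
      ([], 0, 0)
  let directions := st.1
  let pos_dir_count := st.2.1
  let neg_dir_count := st.2.2
  if pos_dir_count > neg_dir_count then pvALoop differences directions (-1)
  else if pos_dir_count < neg_dir_count then pvALoop differences directions 1
  else false

-- ===== PORT B =====
def determine_safety_alt (report_list : List Int) : Bool :=
  let diffs := (report_list.zip report_list.tail).map (fun p => p.1 - p.2)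
  if diffs.isEmpty then false
  else (diffs.all fun d => decide (1 ≤ d ∧ d ≤ 3)) || (diffs.all fun d => decide (-3 ≤ d ∧ d ≤ -1))

-- ===== PRECONDITION & SPEC =====
def Spec_determine_safety (report_list : List Int) (out : Bool) : Prop := out = determine_safety_alt report_list
instance (report_list : List Int) (out : Bool) : Decidable (Spec_determine_safety report_list out) := by unfold Spec_determine_safety; infer_instance

-- ===== CLAIM (what is proved, stated in full; the proofs are below) =====
def Claim_equal_determine_safety : Prop := ∀ (report_list : List Int), Dom_determine_safety report_list → Spec_determine_safety report_list (determine_safety report_list)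

-- ===== LEMMAS AND PROOFS =====

-- the "direction" of a difference, as A computes it
def pvSgn (d : Int) : Int := if d ≠ 0 then PySem.Int.floordiv d |d| else 0

theorem pvSgn_spec (d : Int) : pvSgn d = if 0 < d then 1 else if d < 0 then -1 else 0 := by
  unfold pvSgn
  rcases lt_trichotomy d 0 with h | h | h
  · rw [if_pos (by omega : d ≠ 0), if_neg (by omega : ¬ 0 < d), if_pos h, abs_of_neg h,
      (PySem.Int.floordiv_eq_iff_of_pos (by omega : (0:Int) < -d))]
    constructor <;> omega
  · simp [h]
  · rw [if_pos (by omega : d ≠ 0), if_pos h, abs_of_pos h,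
      (PySem.Int.floordiv_eq_iff_of_pos h)]
    constructor <;> omega

theorem pvFold_spec (diffs : List Int) (dirs0 : List Int) (p0 n0 : Int) :
    diffs.foldl
      (fun (acc : List Int × Int × Int) i =>
        let direction : Int := if i ≠ 0 then PySem.Int.floordiv i |i| else 0
        (acc.1 ++ [direction],
         (if direction = 1 then acc.2.1 + 1 else acc.2.1),
         (if direction = -1 then acc.2.2 + 1 else acc.2.2)))
      (dirs0, p0, n0)
    = (dirs0 ++ diffs.map pvSgn,
       p0 + (diffs.countP (fun d => decide (0 < d)) : Int),
       n0 + (diffs.countP (fun d => decide (d < 0)) : Int)) := by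
  induction diffs generalizing dirs0 p0 n0 with
  | nil => simp
  | cons d ds ih =>
    simp only [List.foldl_cons, List.map_cons, List.countP_cons]
    rw [ih]
    have hsg : (if d ≠ 0 then PySem.Int.floordiv d |d| else 0) = pvSgn d := rfl
    simp only [Prod.mk.injEq]
    refine ⟨by simp [pvSgn], ?_, ?_⟩ <;>
      · rw [hsg, pvSgn_spec d]
        rcases lt_trichotomy d 0 with h | h | h <;>
          simp [h, not_lt_of_gt] <;> push_cast <;> omega

theorem pvALoop_spec (diffs : List Int) (bad : Int) :
    pvALoop diffs (diffs.map pvSgn) bad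
    = diffs.all (fun d => decide (1 ≤ |d| ∧ |d| ≤ 3 ∧ pvSgn d ≠ bad)) := by
  induction diffs with
  | nil => rfl
  | cons d ds ih =>
    simp only [List.map_cons, pvALoop, List.all_cons, ih]
    by_cases h1 : |d| < 1 ∨ |d| > 3
    · rw [if_pos h1]; simp; omega
    · rw [if_neg h1]
      by_cases h2 : pvSgn d = bad
      · rw [if_pos h2]; simp [h2]
      · rw [if_neg h2]; simp [h2]; omega

theorem pvDiffs_eq (rl : List Int) :
    (List.range (rl.length - 1)).map (fun i => rl.getD i 0 - rl.getD (i + 1) 0)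
    = (rl.zip rl.tail).map (fun p => p.1 - p.2) := by
  apply List.ext_getElem
  · simp [List.length_zip]
  · intro i h1 h2
    have hlen : i < rl.length - 1 := by simpa using h1
    have hi : i < rl.length := by omega
    have hi1 : i + 1 < rl.length := by omega
    simp [List.getElem_zip, List.getElem_tail, List.getD_eq_getElem?_getD,
      List.getElem?_eq_getElem hi, List.getElem?_eq_getElem hi1]

-- A's result as a function of the difference list equals B's predicate
theorem pvCore (diffs : List Int) :
    (let st := diffs.foldl
        (fun (acc : List Int × Int × Int) i =>
          let direction : Int := if i ≠ 0 then PySem.Int.floordiv i |i| else 0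
          (acc.1 ++ [direction],
           (if direction = 1 then acc.2.1 + 1 else acc.2.1),
           (if direction = -1 then acc.2.2 + 1 else acc.2.2)))
        (([] : List Int), (0 : Int), (0 : Int))
     if st.2.1 > st.2.2 then pvALoop diffs st.1 (-1)
     else if st.2.1 < st.2.2 then pvALoop diffs st.1 1
     else false)
    = (if diffs.isEmpty then false
       else (diffs.all fun d => decide (1 ≤ d ∧ d ≤ 3)) || (diffs.all fun d => decide (-3 ≤ d ∧ d ≤ -1))) := by
  rw [pvFold_spec]
  simp only [List.nil_append, zero_add]
  by_cases hp : (diffs.countP (fun d => decide (0 < d)) : Int) > (diffs.countP (fun d => decide (d < 0)) : Int)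
  · rw [if_pos hp, pvALoop_spec]
    have hne : diffs ≠ [] := by
      intro h; subst h; simp at hp
    have hE : diffs.isEmpty = false := by simp [hne]
    by_cases hall : ∀ d ∈ diffs, 1 ≤ d ∧ d ≤ 3
    · have h1 : diffs.all (fun d => decide (1 ≤ |d| ∧ |d| ≤ 3 ∧ pvSgn d ≠ -1)) = true := by
        rw [List.all_eq_true]; intro d hd
        obtain ⟨ha, hb⟩ := hall d hd
        have habs : |d| = d := abs_of_pos (by omega)
        simp only [decide_eq_true_eq]
        rw [habs, pvSgn_spec]
        refine ⟨by omega, by omega, by split_ifs <;> omega⟩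
      have h2 : (diffs.all fun d => decide (1 ≤ d ∧ d ≤ 3)) = true := by
        rw [List.all_eq_true]; intro d hd; simpa using hall d hd
      rw [h1, hE, h2]; simp
    · push_neg at hall
      obtain ⟨d, hd, hbad⟩ := hall
      have h1 : diffs.all (fun d => decide (1 ≤ |d| ∧ |d| ≤ 3 ∧ pvSgn d ≠ -1)) = false := by
        rw [List.all_eq_false]
        refine ⟨d, hd, ?_⟩
        simp only [decide_eq_true_eq]
        rw [pvSgn_spec]
        rintro ⟨ha, hb, hc⟩
        rcases abs_choice d with he | he <;> rw [he] at ha hb <;>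
          split_ifs at hc <;> omega
      have h2 : (diffs.all fun d => decide (1 ≤ d ∧ d ≤ 3)) = false := by
        rw [List.all_eq_false]
        exact ⟨d, hd, by simp only [decide_eq_true_eq]; omega⟩
      have h3 : (diffs.all fun d => decide (-3 ≤ d ∧ d ≤ -1)) = false := by
        have hposex : ∃ e ∈ diffs, 0 < e := by
          by_contra hno
          push_neg at hno
          have hz : diffs.countP (fun d => decide (0 < d)) = 0 := by
            rw [List.countP_eq_zero]
            intro e he
            have h := hno e he
            simp only [decide_eq_true_eq]
            omega
          omega
        obtain ⟨e, he, hpe⟩ := hposex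
        rw [List.all_eq_false]
        exact ⟨e, he, by simp only [decide_eq_true_eq]; omega⟩
      rw [h1, hE, h2, h3]; simp
  · rw [if_neg hp]
    by_cases hn : (diffs.countP (fun d => decide (0 < d)) : Int) < (diffs.countP (fun d => decide (d < 0)) : Int)
    · rw [if_pos hn, pvALoop_spec]
      have hne : diffs ≠ [] := by
        intro h; subst h; simp at hn
      have hE : diffs.isEmpty = false := by simp [hne]
      by_cases hall : ∀ d ∈ diffs, -3 ≤ d ∧ d ≤ -1
      · have h1 : diffs.all (fun d => decide (1 ≤ |d| ∧ |d| ≤ 3 ∧ pvSgn d ≠ 1)) = true := by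
          rw [List.all_eq_true]; intro d hd
          obtain ⟨ha, hb⟩ := hall d hd
          have habs : |d| = -d := abs_of_neg (by omega)
          simp only [decide_eq_true_eq]
          rw [habs, pvSgn_spec]
          refine ⟨by omega, by omega, by split_ifs <;> omega⟩
        have h3 : (diffs.all fun d => decide (-3 ≤ d ∧ d ≤ -1)) = true := by
          rw [List.all_eq_true]; intro d hd; simpa using hall d hd
        have h2 : (diffs.all fun d => decide (1 ≤ d ∧ d ≤ 3)) = false := by
          obtain ⟨e, he⟩ := List.exists_mem_of_ne_nil diffs hne
          have := (hall e he)
          rw [List.all_eq_false]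
          exact ⟨e, he, by simp only [decide_eq_true_eq]; omega⟩
        rw [h1, hE, h2, h3]; simp
      · push_neg at hall
        obtain ⟨d, hd, hbad⟩ := hall
        have h1 : diffs.all (fun d => decide (1 ≤ |d| ∧ |d| ≤ 3 ∧ pvSgn d ≠ 1)) = false := by
          rw [List.all_eq_false]
          refine ⟨d, hd, ?_⟩
          simp only [decide_eq_true_eq]
          rw [pvSgn_spec]
          rintro ⟨ha, hb, hc⟩
          rcases abs_choice d with he | he <;> rw [he] at ha hb <;>
            split_ifs at hc <;> omega
        have h3 : (diffs.all fun d => decide (-3 ≤ d ∧ d ≤ -1)) = false := by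
          rw [List.all_eq_false]
          exact ⟨d, hd, by simp only [decide_eq_true_eq]; omega⟩
        have h2 : (diffs.all fun d => decide (1 ≤ d ∧ d ≤ 3)) = false := by
          have hnegex : ∃ e ∈ diffs, e < 0 := by
            by_contra hno
            push_neg at hno
            have hz : diffs.countP (fun d => decide (d < 0)) = 0 := by
              rw [List.countP_eq_zero]
              intro e he
              have h := hno e he
              simp only [decide_eq_true_eq]
              omega
            omega
          obtain ⟨e, he, hme⟩ := hnegex
          rw [List.all_eq_false]
          exact ⟨e, he, by simp only [decide_eq_true_eq]; omega⟩
        rw [h1, hE, h2, h3]; simp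
    · rw [if_neg hn]
      have heq : diffs.countP (fun d => decide (0 < d)) = diffs.countP (fun d => decide (d < 0)) := by omega
      cases hEc : diffs.isEmpty with
      | true => simp
      | false =>
        have hnonnil : diffs ≠ [] := by
          intro h; rw [h] at hEc; simp at hEc
        have h2 : (diffs.all fun d => decide (1 ≤ d ∧ d ≤ 3)) = false := by
          cases hall : diffs.all (fun d => decide (1 ≤ d ∧ d ≤ 3)) with
          | false => rfl
          | true =>
            exfalso
            have hall' := List.all_eq_true.mp hall
            have hposall : diffs.countP (fun d => decide (0 < d)) = diffs.length := by
              rw [List.countP_eq_length]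
              intro d hd
              have := hall' d hd
              simp only [decide_eq_true_eq] at this ⊢
              omega
            have hnegall : diffs.countP (fun d => decide (d < 0)) = 0 := by
              rw [List.countP_eq_zero]
              intro d hd
              have := hall' d hd
              simp only [decide_eq_true_eq] at this ⊢
              omega
            have hlz : diffs.length = 0 := by omega
            exact hnonnil (List.length_eq_zero_iff.mp hlz)
        have h3 : (diffs.all fun d => decide (-3 ≤ d ∧ d ≤ -1)) = false := by
          cases hall : diffs.all (fun d => decide (-3 ≤ d ∧ d ≤ -1)) with
          | false => rfl
          | true =>
            exfalso
            have hall' := List.all_eq_true.mp hall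
            have hnegall : diffs.countP (fun d => decide (d < 0)) = diffs.length := by
              rw [List.countP_eq_length]
              intro d hd
              have := hall' d hd
              simp only [decide_eq_true_eq] at this ⊢
              omega
            have hposall : diffs.countP (fun d => decide (0 < d)) = 0 := by
              rw [List.countP_eq_zero]
              intro d hd
              have := hall' d hd
              simp only [decide_eq_true_eq] at this ⊢
              omega
            have hlz : diffs.length = 0 := by omega
            exact hnonnil (List.length_eq_zero_iff.mp hlz)
        rw [h2, h3]; simp

-- ===== VERDICT (by name: the statement is the Claim_ definition above) =====
theorem determine_safety_spec : Claim_equal_determine_safety := by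
  intro rl _
  unfold Spec_determine_safety determine_safety determine_safety_alt
  rw [pvDiffs_eq]
  exact pvCore _
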